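-- pv_equiv track=rewrite | github.com/l1asis/rsa-educational-messenger | src/rsa_messenger/crypto.py | lucas_sequences_first_kind
-- ===== SOURCE A (Python) =====
-- def lucas_sequences_first_kind(n: int, p: int, q: int) -> int:
--     """Calculate the nth Lucas sequence of the first kind with parameters p and q."""
--     if n == 0:
--         return 0
--     n -= 1
--     a11, a12, a21, a22 = 0, 1, -q, p
--     b11, b12, b21, b22 = a11, a12, a21, a22
--     while n > 0:
--         if n % 2 == 1:
--             b11, b12, b21, b22 = a11*b11+a12*b21, a11*b12+a12*b22, a21*b11+a22*b21, a21*b12+a22*b22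
--         a11, a12, a21, a22 = a11*a11+a12*a21, a11*a12+a12*a22, a21*a11+a22*a21, a21*a12+a22*a22
--         n //= 2
--     return b11*0+b12*1
-- ===== SOURCE B (Python) =====
-- def lucas_sequences_first_kind(n: int, p: int, q: int) -> int:
--     """Calculate the nth Lucas sequence of the first kind with parameters p and q."""
--     if n == 0:
--         return 0
--     a, b = 0, 1
--     for _ in range(n - 1):
--         a, b = b, p * b - q * a
--     return b
-- ===== Notes on version B (the rewrite author's own statement) =====
-- stated objective: simpler
-- what changed: Replaced 2x2 companion-matrix binary exponentiation with a direct two-variable iteration of the Lucas recurrence U_k = p*U_{k-1} - q*U_{k-2}; the empty range for n<=1 reproduces A's return of 1 for negative n.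
import Mathlib
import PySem

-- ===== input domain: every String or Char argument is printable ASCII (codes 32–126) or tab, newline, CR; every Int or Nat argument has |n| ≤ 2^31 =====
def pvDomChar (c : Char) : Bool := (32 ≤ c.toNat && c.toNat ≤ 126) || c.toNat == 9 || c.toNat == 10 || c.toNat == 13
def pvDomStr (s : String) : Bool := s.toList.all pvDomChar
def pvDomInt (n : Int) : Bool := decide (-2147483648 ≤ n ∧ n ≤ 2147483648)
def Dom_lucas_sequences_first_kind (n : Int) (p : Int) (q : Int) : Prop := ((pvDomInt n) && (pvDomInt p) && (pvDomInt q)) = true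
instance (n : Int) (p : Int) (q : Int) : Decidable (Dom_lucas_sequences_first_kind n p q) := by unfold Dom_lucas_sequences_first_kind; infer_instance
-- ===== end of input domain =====

-- B replaces A's 2x2 companion-matrix binary exponentiation by a direct two-variable
-- iteration of the Lucas recurrence U_k = p*U_{k-1} - q*U_{k-2} (objective: simpler).

-- ===== PORT A =====
-- A's while-loop: state is the two 2x2 matrices (a11,a12,a21,a22) and (b11,b12,b21,b22),
-- kept as 4-tuples; the simultaneous assignments are the tuple updates, step for step.
def lucasLoopA (n : Int) (a b : Int × Int × Int × Int) : Int × Int × Int × Int :=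
  if 0 < n then
    let b' := if PySem.Int.mod n 2 == 1 then
        (a.1*b.1+a.2.1*b.2.2.1, a.1*b.2.1+a.2.1*b.2.2.2,
         a.2.2.1*b.1+a.2.2.2*b.2.2.1, a.2.2.1*b.2.1+a.2.2.2*b.2.2.2)
      else b
    let a' := (a.1*a.1+a.2.1*a.2.2.1, a.1*a.2.1+a.2.1*a.2.2.2,
               a.2.2.1*a.1+a.2.2.2*a.2.2.1, a.2.2.1*a.2.1+a.2.2.2*a.2.2.2)
    lucasLoopA (PySem.Int.floordiv n 2) a' b'
  else b
termination_by n.toNat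
decreasing_by
  rw [PySem.Int.floordiv_eq_ediv_of_pos (by omega)]
  omega

def lucas_sequences_first_kind (n : Int) (p : Int) (q : Int) : Int :=
  if n == 0 then 0
  else
    let r := lucasLoopA (n - 1) (0, 1, -q, p) (0, 1, -q, p)
    r.1 * 0 + r.2.1 * 1

-- ===== PORT B =====
def lucas_sequences_first_kind_alt (n : Int) (p : Int) (q : Int) : Int :=
  if n == 0 then 0
  else
    ((PySem.List.pyRange 0 (n - 1) 1).foldl
      (fun (ab : Int × Int) _ => (ab.2, p * ab.2 - q * ab.1)) (0, 1)).2

-- ===== PRECONDITION & SPEC =====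
def Spec_lucas_sequences_first_kind (n : Int) (p : Int) (q : Int) (out : Int) : Prop := out = lucas_sequences_first_kind_alt n p q
instance (n : Int) (p : Int) (q : Int) (out : Int) : Decidable (Spec_lucas_sequences_first_kind n p q out) := by unfold Spec_lucas_sequences_first_kind; infer_instance

-- ===== CLAIM (what is proved, stated in full; the proofs are below) =====
def Claim_equal_lucas_sequences_first_kind : Prop := ∀ (n : Int) (p : Int) (q : Int), Dom_lucas_sequences_first_kind n p q → Spec_lucas_sequences_first_kind n p q (lucas_sequences_first_kind n p q)

-- ===== LEMMAS AND PROOFS =====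

-- the Lucas sequence of the first kind
def lucasU (p q : Int) : Nat → Int
  | 0 => 0
  | 1 => 1
  | (k+2) => p * lucasU p q (k+1) - q * lucasU p q k

-- 2x2 integer matrices as 4-tuples
def mmul (x y : Int × Int × Int × Int) : Int × Int × Int × Int :=
  (x.1*y.1+x.2.1*y.2.2.1, x.1*y.2.1+x.2.1*y.2.2.2,
   x.2.2.1*y.1+x.2.2.2*y.2.2.1, x.2.2.1*y.2.1+x.2.2.2*y.2.2.2)

def mpow (x : Int × Int × Int × Int) : Nat → Int × Int × Int × Int
  | 0 => (1, 0, 0, 1)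
  | (k+1) => mmul (mpow x k) x

theorem mmul_one_left (b : Int × Int × Int × Int) : mmul (1, 0, 0, 1) b = b := by
  obtain ⟨b1, b2, b3, b4⟩ := b
  simp [mmul]

theorem mmul_assoc (x y z : Int × Int × Int × Int) :
    mmul (mmul x y) z = mmul x (mmul y z) := by
  obtain ⟨x1, x2, x3, x4⟩ := x
  obtain ⟨y1, y2, y3, y4⟩ := y
  obtain ⟨z1, z2, z3, z4⟩ := z
  simp only [mmul]
  refine Prod.ext (by ring) (Prod.ext (by ring) (Prod.ext (by ring) (by ring)))

theorem mpow_sq (a : Int × Int × Int × Int) (k : Nat) :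
    mpow (mmul a a) k = mpow a (2 * k) := by
  induction k with
  | zero => rfl
  | succ k ih =>
      have : 2 * (k + 1) = (2 * k + 1) + 1 := by omega
      rw [this]
      show mmul (mpow (mmul a a) k) (mmul a a) = mpow a ((2*k+1)+1)
      rw [ih]
      show _ = mmul (mmul (mpow a (2*k)) a) a
      rw [mmul_assoc]

-- binary-exponentiation invariant of A's loop
theorem lucasLoopA_eq (k : Nat) : ∀ (m : Int), m.toNat = k → 0 ≤ m →
    ∀ (a b : Int × Int × Int × Int), lucasLoopA m a b = mmul (mpow a m.toNat) b := by
  induction k using Nat.strong_induction_on with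
  | _ k ih =>
    intro m hk hm a b
    by_cases hpos : 0 < m
    · rw [lucasLoopA]
      simp only [hpos, dite_true]
      have h2 : PySem.Int.floordiv m 2 = m / 2 := PySem.Int.floordiv_eq_ediv_of_pos (by omega)
      have hmod : PySem.Int.mod m 2 = m % 2 := PySem.Int.mod_eq_emod_of_pos (by omega)
      have hrec := ih (m / 2).toNat (by omega) (m / 2) rfl (by omega)
      have ea : (a.1*a.1+a.2.1*a.2.2.1, a.1*a.2.1+a.2.1*a.2.2.2,
                 a.2.2.1*a.1+a.2.2.2*a.2.2.1, a.2.2.1*a.2.1+a.2.2.2*a.2.2.2) = mmul a a := rfl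
      have eb : (a.1*b.1+a.2.1*b.2.2.1, a.1*b.2.1+a.2.1*b.2.2.2,
                 a.2.2.1*b.1+a.2.2.2*b.2.2.1, a.2.2.1*b.2.1+a.2.2.2*b.2.2.2) = mmul a b := rfl
      by_cases hodd : m % 2 = 1
      · have hcond : (PySem.Int.mod m 2 == 1) = true := by rw [hmod, hodd]; rfl
        rw [hcond, if_pos rfl, h2, ea, eb, hrec]
        have hsplit : m.toNat = 2 * (m / 2).toNat + 1 := by omega
        rw [hsplit]
        show mmul (mpow (mmul a a) (m/2).toNat) (mmul a b) = mmul (mpow a (2*(m/2).toNat + 1)) b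
        rw [mpow_sq]
        show _ = mmul (mmul (mpow a (2*(m/2).toNat)) a) b
        rw [mmul_assoc]
      · have hcond : (PySem.Int.mod m 2 == 1) = false := by
          rw [hmod]; simp; omega
        rw [hcond, if_neg (show ¬(false = true) by simp), h2, ea, hrec]
        have hsplit : m.toNat = 2 * (m / 2).toNat := by omega
        rw [hsplit, mpow_sq]
        simp
    · have hm0 : m = 0 := by omega
      subst hm0
      rw [lucasLoopA]
      simp [mpow, mmul_one_left]

-- entries of powers of the companion matrix, in terms of lucasU
theorem mpow_companion (p q : Int) (k : Nat) :
    mpow (0, 1, -q, p) k =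
      (lucasU p q (k+1) - p * lucasU p q k, lucasU p q k,
       -q * lucasU p q k, lucasU p q (k+1)) := by
  induction k with
  | zero => simp [mpow, lucasU]
  | succ k ih =>
      show mmul (mpow (0,1,-q,p) k) (0,1,-q,p) = _
      rw [ih]
      simp only [mmul, lucasU]
      refine Prod.ext (by ring) (Prod.ext (by ring) (Prod.ext (by ring) (by ring)))

-- B's fold advances the rolling pair (U_k, U_{k+1}) once per element
theorem foldB_eq (p q : Int) (l : List Int) : ∀ (k : Nat),
    l.foldl (fun (ab : Int × Int) _ => (ab.2, p * ab.2 - q * ab.1))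
        (lucasU p q k, lucasU p q (k+1))
      = (lucasU p q (k + l.length), lucasU p q (k + l.length + 1)) := by
  induction l with
  | nil => intro k; simp
  | cons x l ih =>
      intro k
      simp only [List.foldl_cons, List.length_cons]
      have hstep : (p * lucasU p q (k+1) - q * lucasU p q k) = lucasU p q (k+2) := by
        rw [show k + 2 = (k + 1) + 1 from rfl]; rfl
      rw [hstep]
      have := ih (k + 1)
      simpa [Nat.add_comm, Nat.add_assoc, Nat.add_left_comm] using this

-- ===== VERDICT (by name: the statement is the Claim_ definition above) =====
theorem lucas_sequences_first_kind_spec : Claim_equal_lucas_sequences_first_kind := by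
  intro n p q _
  unfold Spec_lucas_sequences_first_kind lucas_sequences_first_kind lucas_sequences_first_kind_alt
  by_cases h0 : n = 0
  · simp [h0]
  · simp only [beq_iff_eq, if_neg h0]
    by_cases hpos : 0 < n
    · -- n ≥ 1: both sides compute U n
      have hA := lucasLoopA_eq (n-1).toNat (n-1) rfl (by omega) (0,1,-q,p) (0,1,-q,p)
      have hB := foldB_eq p q (PySem.List.pyRange 0 (n-1) 1) 0
      have hlen : (PySem.List.pyRange 0 (n-1) 1).length = (n-1).toNat := by
        rw [PySem.List.length_pyRange_one]; simp
      rw [hA]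
      have : mmul (mpow (0,1,-q,p) (n-1).toNat) (0,1,-q,p)
           = mpow (0,1,-q,p) ((n-1).toNat + 1) := rfl
      rw [this, mpow_companion]
      have hB' : (lucasU p q 0, lucasU p q 1) = ((0 : Int), (1 : Int)) := by
        simp [lucasU]
      rw [← hB', hB, hlen]
      simp
    · -- n < 0: loop body never runs and the range is empty; both return 1
      have hneg : n - 1 ≤ 0 := by omega
      rw [lucasLoopA]
      simp only [show ¬ (0 < n - 1) by omega, dite_false]
      rw [PySem.List.pyRange_one_eq_nil (by omega)]
      simp
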